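-- pv_equiv track=rewrite | github.com/F-Marchal/SnpHeatMap | main.py | compile_gene_snp
-- ===== SOURCE A (Python) =====
-- def compile_gene_snp(genes_snp: dict[str, any], dict_of_number: dict[int, dict[str, int]] = None,
--                      group: str = "None") -> dict[int, dict[str, int]]:
--     """!
--     @brief Extract the number of snp of all genes contained in @p genes_snp (snp = @p genes_snp 's values).
--     Each number of snp is stored inside a new dictionary (@p dict_of_number 's keys). A dict is created in front
--     of all keys (i.e. snp number). This dict contain the @p group (key) and the number of occurrences of this
--     snp number for this key.
--
--     @param genes_snp : dict[str,any] => A dictionary from @ref extract_data_from_table.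
--         e.g. {gene_1: number_of_snp_in_gene_1} =>  @code {"gene1": 3}  @endcode
--         @note Values (number of snp) inside this dict are trans typed into integers.
--     @param dict_of_number : dict[int, dict[str,int]] = None.
--         A dict with the same structure as dictionaries returned by this function.
--     @param group : str = "None" => Each occurrence of a number of snp increment the counter related to this group.
--
--     @return dict[int, dict[str, int]] => A dictionary that store all number of snp found along with the number of
--     occurrences {number_of_snp_1 : {group1: number_of_occurrences_of_number_of_snp_1_in_this_group}
--     """
--     dict_of_number = {} if dict_of_number is None else dict_of_number
--
--     for _, snp_count in genes_snp.items():
--         snp_count = int(snp_count)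
--
--         # Add this 'snp_count' to dict_of_number
--         if snp_count not in dict_of_number:
--             dict_of_number[snp_count] = {}
--
--         # Add this 'group' to dict_of_number[snp_count]
--         if group not in dict_of_number[snp_count]:
--             dict_of_number[snp_count][group] = 0
--
--         dict_of_number[snp_count][group] += 1
--
--     return dict_of_number
-- ===== SOURCE B (Python) =====
-- def compile_gene_snp(genes_snp, dict_of_number=None, group="None"):
--     # Three-phase rebuild: (1) tally occurrences per snp value, (2) rebuild every
--     # existing entry of dict_of_number (merging the tally into it and consuming it),
--     # (3) append a fresh {group: n} entry for each remaining new snp value.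
--     # Returns a NEW dict (A mutates dict_of_number in place; return values agree).
--     counts = {}
--     for v in genes_snp.values():
--         k = int(v)
--         counts[k] = counts.get(k, 0) + 1
--     result = {}
--     for snp, inner in ({} if dict_of_number is None else dict_of_number).items():
--         if snp in counts:
--             merged = dict(inner)
--             merged[group] = merged.get(group, 0) + counts.pop(snp)
--             result[snp] = merged
--         else:
--             result[snp] = dict(inner)
--     for snp, n in counts.items():
--         result[snp] = {group: n}
--     return result
-- ===== Notes on version B (the rewrite author's own statement) =====
-- stated objective: alternative
-- what changed: B rebuilds the result in three phases - tally occurrences per snp value, rebuild every existing dict_of_number entry once with its tally merged in (consuming the tally), then append a fresh {group: n} entry per remaining new snp value - instead of A's per-gene in-place nested-dict increments; B returns a new dict rather than mutating dict_of_number.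
import Mathlib
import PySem

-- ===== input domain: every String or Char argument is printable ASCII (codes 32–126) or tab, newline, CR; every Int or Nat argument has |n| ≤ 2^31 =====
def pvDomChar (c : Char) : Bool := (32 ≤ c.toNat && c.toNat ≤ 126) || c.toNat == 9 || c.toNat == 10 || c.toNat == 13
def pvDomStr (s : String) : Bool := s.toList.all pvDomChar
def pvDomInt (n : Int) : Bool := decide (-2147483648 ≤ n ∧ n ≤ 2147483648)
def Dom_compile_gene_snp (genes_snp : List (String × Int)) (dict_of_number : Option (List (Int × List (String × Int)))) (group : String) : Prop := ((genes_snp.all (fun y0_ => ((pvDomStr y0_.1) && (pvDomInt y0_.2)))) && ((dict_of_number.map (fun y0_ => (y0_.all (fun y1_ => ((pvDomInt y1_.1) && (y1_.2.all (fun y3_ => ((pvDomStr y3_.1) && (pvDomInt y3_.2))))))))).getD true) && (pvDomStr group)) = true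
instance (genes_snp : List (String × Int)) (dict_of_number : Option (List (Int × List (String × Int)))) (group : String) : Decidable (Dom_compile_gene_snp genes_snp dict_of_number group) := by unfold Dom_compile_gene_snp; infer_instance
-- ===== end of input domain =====

-- B rebuilds the result in three phases — tally per snp value, rebuild the existing entries
-- with the tally merged in, append fresh entries for the remaining new values — instead of A's
-- per-gene in-place increments (objective: alternative). A mutates dict_of_number in place
-- while B builds a new dict; the equivalence proved here is about the return value.

-- Harness boundary: a Python dict argument/result as a PySem.Dict (last value wins, first position kept).
def pvToOuter (l : List (Int × List (String × Int))) : PySem.Dict Int (PySem.Dict String Int) :=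
  PySem.Dict.ofList (l.map (fun p => (p.1, PySem.Dict.ofList p.2)))

def pvFromOuter (d : PySem.Dict Int (PySem.Dict String Int)) : List (Int × List (String × Int)) :=
  d.items.map (fun p => (p.1, p.2.items))

-- ===== PORT A =====
def compile_gene_snp (genes_snp : List (String × Int)) (dict_of_number : Option (List (Int × List (String × Int)))) (group : String) : List (Int × List (String × Int)) :=
  -- dict_of_number = {} if dict_of_number is None else dict_of_number
  let d0 : PySem.Dict Int (PySem.Dict String Int) :=
    match dict_of_number with
    | none => PySem.Dict.empty
    | some l => pvToOuter l
  -- for _, snp_count in genes_snp.items(): …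
  let d := genes_snp.foldl (fun d p =>
      let snp_count : Int := p.2  -- int(snp_count): identity on an int value
      -- if snp_count not in dict_of_number: dict_of_number[snp_count] = {}
      let d := if d.contains snp_count then d else d.insert snp_count PySem.Dict.empty
      let inner := d.getD snp_count PySem.Dict.empty
      -- if group not in dict_of_number[snp_count]: dict_of_number[snp_count][group] = 0
      let inner := if inner.contains group then inner else inner.insert group 0
      -- dict_of_number[snp_count][group] += 1
      d.insert snp_count (inner.insert group (inner.getD group 0 + 1))) d0
  pvFromOuter d

-- ===== PORT B =====
def compile_gene_snp_alt (genes_snp : List (String × Int)) (dict_of_number : Option (List (Int × List (String × Int)))) (group : String) : List (Int × List (String × Int)) :=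
  -- phase 1: counts = {}; for v in genes_snp.values(): counts[int(v)] = counts.get(int(v), 0) + 1
  let counts : PySem.Dict Int Int :=
    genes_snp.foldl (fun c p => c.insert p.2 (c.getD p.2 0 + 1)) PySem.Dict.empty
  -- phase 2: rebuild the existing entries, consuming the tally
  --   for snp, inner in ({} if dict_of_number is None else dict_of_number).items(): …
  let old : PySem.Dict Int (PySem.Dict String Int) :=
    match dict_of_number with
    | none => PySem.Dict.empty
    | some l => pvToOuter l
  let st := old.items.foldl
    (fun (st : PySem.Dict Int (PySem.Dict String Int) × PySem.Dict Int Int) q =>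
      if st.2.contains q.1 then
        -- merged = dict(inner); merged[group] = merged.get(group, 0) + counts.pop(snp)
        (st.1.insert q.1 (q.2.insert group (q.2.getD group 0 + st.2.getD q.1 0)), st.2.erase q.1)
      else
        (st.1.insert q.1 q.2, st.2))
    (PySem.Dict.empty, counts)
  -- phase 3: for snp, n in counts.items(): result[snp] = {group: n}
  let result := st.2.items.foldl
    (fun r (q : Int × Int) => r.insert q.1 (PySem.Dict.ofList [(group, q.2)])) st.1
  pvFromOuter result

-- ===== PRECONDITION & SPEC =====
def Spec_compile_gene_snp (genes_snp : List (String × Int)) (dict_of_number : Option (List (Int × List (String × Int)))) (group : String) (out : List (Int × List (String × Int))) : Prop := out = compile_gene_snp_alt genes_snp dict_of_number group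
instance (genes_snp : List (String × Int)) (dict_of_number : Option (List (Int × List (String × Int)))) (group : String) (out : List (Int × List (String × Int))) : Decidable (Spec_compile_gene_snp genes_snp dict_of_number group out) := by unfold Spec_compile_gene_snp; infer_instance

-- ===== CLAIM (what is proved, stated in full; the proofs are below) =====
def Claim_equal_compile_gene_snp : Prop := ∀ (genes_snp : List (String × Int)) (dict_of_number : Option (List (Int × List (String × Int)))) (group : String), Dom_compile_gene_snp genes_snp dict_of_number group → Spec_compile_gene_snp genes_snp dict_of_number group (compile_gene_snp genes_snp dict_of_number group)

-- ===== LEMMAS AND PROOFS =====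

-- One increment step at key k, the core of A's loop body.
def pvBump (group : String) (I : PySem.Dict String Int) (n : Int) : PySem.Dict String Int :=
  I.insert group (I.getD group 0 + n)

def pvG (group : String) (d : PySem.Dict Int (PySem.Dict String Int)) (k : Int) (n : Int) :
    PySem.Dict Int (PySem.Dict String Int) :=
  d.insert k (pvBump group (d.getD k PySem.Dict.empty) n)

-- A's loop body is pvG with increment 1.
theorem stepA_eq (group : String) :
    (fun (d : PySem.Dict Int (PySem.Dict String Int)) (p : String × Int) =>
      let snp_count : Int := p.2
      let d := if d.contains snp_count then d else d.insert snp_count PySem.Dict.empty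
      let inner := d.getD snp_count PySem.Dict.empty
      let inner := if inner.contains group then inner else inner.insert group 0
      d.insert snp_count (inner.insert group (inner.getD group 0 + 1)))
    = fun d p => pvG group d p.2 1 := by
  funext d p
  simp only [pvG, pvBump]
  by_cases hk : d.contains p.2 = true
  · simp only [hk, if_true]
    by_cases hg : (d.getD p.2 PySem.Dict.empty).contains group = true
    · simp only [hg, if_true]
    · simp only [hg, Bool.false_eq_true, if_false, PySem.Dict.getD_insert_self,
        PySem.Dict.insert_insert_self,
        PySem.Dict.getD_of_not_contains _ _ (by simpa using hg), zero_add]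
  · have hD : d.getD p.2 PySem.Dict.empty = PySem.Dict.empty :=
      PySem.Dict.getD_of_not_contains _ _ (by simpa using hk)
    simp only [hk, Bool.false_eq_true, if_false, PySem.Dict.getD_insert_self, hD,
      PySem.Dict.contains_empty, PySem.Dict.getD_empty, PySem.Dict.insert_insert_self,
      zero_add]

theorem pvBump_pvBump (group : String) (I : PySem.Dict String Int) (a b : Int) :
    pvBump group (pvBump group I a) b = pvBump group I (a + b) := by
  simp [pvBump, PySem.Dict.insert_insert_self, PySem.Dict.getD_insert_self, add_assoc]

-- Value of A's fold at any key: the original inner dict, bumped by the number of occurrences.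
theorem getD_foldl_one (group : String) (xs : List Int)
    (d0 : PySem.Dict Int (PySem.Dict String Int)) (k : Int) :
    (xs.foldl (fun d x => pvG group d x 1) d0).getD k PySem.Dict.empty
      = if xs.count k = 0 then d0.getD k PySem.Dict.empty
        else pvBump group (d0.getD k PySem.Dict.empty) (xs.count k : Int) := by
  induction xs generalizing d0 with
  | nil => simp
  | cons x xs ih =>
    simp only [List.foldl_cons, ih (pvG group d0 x 1)]
    by_cases hx : x = k
    · subst hx
      simp only [pvG, PySem.Dict.getD_insert_self, List.count_cons_self]
      by_cases h0 : xs.count x = 0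
      · simp [h0]
      · have h1 : xs.count x + 1 ≠ 0 := by omega
        simp only [if_neg h0, if_neg h1, pvBump_pvBump]
        congr 1
        push_cast
        ring
    · have hg : (pvG group d0 x 1).getD k PySem.Dict.empty = d0.getD k PySem.Dict.empty := by
        simp [pvG, PySem.Dict.getD_insert, Ne.symm hx]
      rw [hg, List.count_cons_of_ne hx]

-- erase facts (erase is a filter of the items list).
theorem erase_of_not_contains {κ ν : Type} [BEq κ] (d : PySem.Dict κ ν) (k : κ)
    (h : d.contains k = false) : d.erase k = d := by
  apply PySem.Dict.ext
  simp only [PySem.Dict.erase]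
  apply List.filter_eq_self.mpr
  intro p hp
  simp only [PySem.Dict.contains, List.any_eq_false] at h
  simpa using h p hp

theorem contains_erase_ne {κ ν : Type} [BEq κ] [LawfulBEq κ] (d : PySem.Dict κ ν) (k k' : κ)
    (h : k' ≠ k) : (d.erase k).contains k' = d.contains k' := by
  simp only [PySem.Dict.erase, PySem.Dict.contains, List.any_filter]
  apply List.any_congr rfl
  intro p
  cases hpk : (p.1 == k') <;> simp_all

theorem getD_erase_ne {κ ν : Type} [BEq κ] [LawfulBEq κ] (d : PySem.Dict κ ν) (k k' : κ) (v : ν)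
    (h : k' ≠ k) : (d.erase k).getD k' v = d.getD k' v := by
  simp only [PySem.Dict.getD, PySem.Dict.get?, PySem.Dict.erase]
  rw [List.find?_filter]
  have hfind : ∀ (l : List (κ × ν)), l.find? (fun a => decide ((!a.1 == k) = true ∧ (a.1 == k') = true)) = l.find? (fun p => p.1 == k') := by
    intro l
    induction l with
    | nil => rfl
    | cons a t ih =>
      simp only [List.find?_cons]
      by_cases ha : (a.1 == k') = true
      · have h2 : a.1 ≠ k := fun he => h (by simp_all)
        simp_all
      · simp only [ha]
        simpa using ih
  rw [hfind]

-- Erasing a list of keys filters the items list.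
theorem items_foldl_erase {κ ν : Type} [BEq κ] [LawfulBEq κ] (ks : List κ) (d : PySem.Dict κ ν) :
    (ks.foldl (fun c k => c.erase k) d).items = d.items.filter (fun p => !ks.contains p.1) := by
  induction ks generalizing d with
  | nil => simp
  | cons k ks ih =>
    rw [List.foldl_cons, ih, show (d.erase k).items = d.items.filter (fun p => !p.1 == k) from rfl,
      List.filter_filter]
    apply List.filter_congr
    intro p _
    show (!ks.contains p.1 && !p.1 == k) = !(k :: ks).contains p.1
    rw [List.contains_cons]
    cases hk : (k == p.1) <;> cases hks : ks.contains p.1 <;> simp_all [BEq.comm]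

-- Phase 2 of B splits: the rebuilt dict is an insert-fold over the old items with values read
-- from the UNTOUCHED tally, and the remaining tally is an erase-fold — valid because the old keys are distinct.
theorem pass1_spec (group : String) (L : List (Int × PySem.Dict String Int))
    (hL : (L.map Prod.fst).Nodup) (res : PySem.Dict Int (PySem.Dict String Int))
    (cnt : PySem.Dict Int Int) :
    L.foldl (fun (st : PySem.Dict Int (PySem.Dict String Int) × PySem.Dict Int Int) q =>
        if st.2.contains q.1 then
          (st.1.insert q.1 (q.2.insert group (q.2.getD group 0 + st.2.getD q.1 0)), st.2.erase q.1)
        else (st.1.insert q.1 q.2, st.2)) (res, cnt)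
    = (L.foldl (fun r q => r.insert q.1
          (if cnt.contains q.1 then q.2.insert group (q.2.getD group 0 + cnt.getD q.1 0) else q.2)) res,
       L.foldl (fun c q => c.erase q.1) cnt) := by
  induction L generalizing res cnt with
  | nil => simp
  | cons q t ih =>
    rw [List.map_cons, List.nodup_cons] at hL
    obtain ⟨h1, hnd'⟩ := hL
    have hne : ∀ q' ∈ t, q'.1 ≠ q.1 := by
      intro q' hq' he
      exact h1 (he ▸ List.mem_map.mpr ⟨q', hq', rfl⟩)
    by_cases hc : cnt.contains q.1 = true
    · simp only [List.foldl_cons, hc, if_true]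
      rw [ih hnd' _ (cnt.erase q.1)]
      congr 1
      apply PySem.List.foldl_congr_mem
      intro acc x hx
      rw [contains_erase_ne cnt q.1 x.1 (hne x hx), getD_erase_ne cnt q.1 x.1 0 (hne x hx)]
    · simp only [List.foldl_cons, hc, Bool.false_eq_true, if_false]
      rw [ih hnd' _ cnt, erase_of_not_contains cnt q.1 (by simpa using hc)]


-- The two result dictionaries coincide.
theorem dicts_eq (group : String) (xs : List Int)
    (d0 : PySem.Dict Int (PySem.Dict String Int)) (hnd : d0.keys.Nodup) :
    xs.foldl (fun d x => pvG group d x 1) d0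
      = (let st := d0.items.foldl
            (fun (st : PySem.Dict Int (PySem.Dict String Int) × PySem.Dict Int Int) q =>
              if st.2.contains q.1 then
                (st.1.insert q.1 (q.2.insert group (q.2.getD group 0 + st.2.getD q.1 0)), st.2.erase q.1)
              else (st.1.insert q.1 q.2, st.2))
            (PySem.Dict.empty, PySem.Dict.counter xs);
         st.2.items.foldl (fun r (q : Int × Int) => r.insert q.1 (PySem.Dict.ofList [(group, q.2)])) st.1) := by
  have hndI : (d0.items.map Prod.fst).Nodup := hnd
  simp only []
  rw [pass1_spec group d0.items hndI]
  set val : Int × PySem.Dict String Int → PySem.Dict String Int := fun q =>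
    if (PySem.Dict.counter xs).contains q.1 then
      q.2.insert group (q.2.getD group 0 + (PySem.Dict.counter xs).getD q.1 0) else q.2 with hval
  -- phase-2 rebuilt dict: items are the old items with the tally merged in
  have hres : (d0.items.foldl (fun r q => r.insert q.1 (val q)) PySem.Dict.empty).items
      = d0.items.map (fun q => (q.1, val q)) := by
    rw [PySem.Dict.items_foldl_insert_fresh d0.items Prod.fst val PySem.Dict.empty
      (fun a _ => PySem.Dict.contains_empty a.1) hndI]
    rfl
  -- remaining tally: the new keys of xs, in first-occurrence order
  have hcnt : (d0.items.foldl (fun c q => c.erase q.1) (PySem.Dict.counter xs)).items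
      = ((PySem.Set.ofList xs).filter (fun y => !d0.keys.contains y)).map
          (fun k => (k, (xs.count k : Int))) := by
    rw [← List.foldl_map (f := @Prod.fst Int (PySem.Dict String Int))
        (g := fun (c : PySem.Dict Int Int) k => c.erase k), items_foldl_erase,
      PySem.Dict.items_counter, List.filter_map]
    rfl
  -- A's dict: keys and values
  have hkeysA : (xs.foldl (fun d x => pvG group d x 1) d0).keys = PySem.Set.update d0.keys xs :=
    PySem.Dict.keys_foldl_insert xs (fun d x => pvBump group (d.getD x PySem.Dict.empty) 1) d0
  have hndA : (xs.foldl (fun d x => pvG group d x 1) d0).keys.Nodup :=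
    PySem.Dict.nodup_keys_foldl_insert xs (fun d x => pvBump group (d.getD x PySem.Dict.empty) 1) d0 hnd
  apply PySem.Dict.ext
  rw [PySem.Dict.items_eq_map_keys _ hndA PySem.Dict.empty, hkeysA,
    PySem.Set.update_eq_append_filter, List.map_append]
  -- B's final dict appends the fresh entries to the rebuilt ones
  have hkeysR : (d0.items.foldl (fun r q => r.insert q.1 (val q)) PySem.Dict.empty).keys
      = d0.keys := by
    show ((d0.items.foldl (fun r q => r.insert q.1 (val q)) PySem.Dict.empty).items).map
        (fun p => p.1) = d0.items.map (fun p => p.1)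
    rw [hres, List.map_map]
    rfl
  have hfresh : ∀ a ∈ ((PySem.Set.ofList xs).filter (fun y => !d0.keys.contains y)).map
      (fun k => (k, (xs.count k : Int))),
      (d0.items.foldl (fun r q => r.insert q.1 (val q)) PySem.Dict.empty).contains a.1 = false := by
    intro a ha
    obtain ⟨k, hk, rfl⟩ := List.mem_map.mp ha
    have hk2 := (List.mem_filter.mp hk).2
    rw [PySem.Dict.contains_eq_decide_mem_keys, hkeysR]
    simpa using hk2
  have hndF : (((PySem.Set.ofList xs).filter (fun y => !d0.keys.contains y)).map
      (fun k => (k, (xs.count k : Int))) |>.map Prod.fst).Nodup := by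
    rw [List.map_map]
    show (((PySem.Set.ofList xs).filter (fun y => !d0.keys.contains y)).map id).Nodup
    rw [List.map_id]
    exact (PySem.Set.nodup_ofList xs).filter _
  rw [hcnt, PySem.Dict.items_foldl_insert_fresh _ Prod.fst _ _ hfresh hndF, hres]
  congr 1
  · -- existing entries
    rw [show d0.keys = d0.items.map Prod.fst from rfl, List.map_map]
    apply List.map_congr_left
    intro q hq
    have hq2 : d0.getD q.1 PySem.Dict.empty = q.2 :=
      PySem.Dict.getD_of_mem_items d0 (by simpa using hq) hnd PySem.Dict.empty
    show (q.1, (xs.foldl (fun d x => pvG group d x 1) d0).getD q.1 PySem.Dict.empty) = (q.1, val q)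
    rw [getD_foldl_one, hq2, hval]
    simp only [PySem.Dict.contains_counter, PySem.Dict.getD_counter]
    by_cases hm : q.1 ∈ xs
    · have hc : xs.count q.1 ≠ 0 := by rw [Ne, List.count_eq_zero]; exact fun h => h hm
      rw [if_neg hc, if_pos (by simpa using hm)]
      rfl
    · have hc : xs.count q.1 = 0 := List.count_eq_zero.mpr hm
      rw [if_pos hc, if_neg]
      simpa using hm
  · -- fresh entries
    rw [List.map_map]
    apply List.map_congr_left
    intro k hk
    obtain ⟨hk1, hk2⟩ := List.mem_filter.mp hk
    have hmem : k ∈ xs := (PySem.Set.mem_ofList xs k).mp hk1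
    have hc : xs.count k ≠ 0 := by rw [Ne, List.count_eq_zero]; exact fun h => h hmem
    have hnc : d0.contains k = false := by
      rw [PySem.Dict.contains_eq_decide_mem_keys]
      simpa using hk2
    show (k, (xs.foldl (fun d x => pvG group d x 1) d0).getD k PySem.Dict.empty)
      = (k, PySem.Dict.ofList [(group, (xs.count k : Int))])
    rw [getD_foldl_one, if_neg hc, PySem.Dict.getD_of_not_contains d0 PySem.Dict.empty hnc]
    refine congrArg (Prod.mk k) ?_
    show pvBump group PySem.Dict.empty (xs.count k : Int) = PySem.Dict.empty.insert group (xs.count k : Int)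
    simp [pvBump]

-- ===== VERDICT (by name: the statement is the Claim_ definition above) =====
theorem compile_gene_snp_spec : Claim_equal_compile_gene_snp := by
  intro genes_snp dict_of_number group _
  show compile_gene_snp genes_snp dict_of_number group = compile_gene_snp_alt genes_snp dict_of_number group
  simp only [compile_gene_snp, compile_gene_snp_alt, stepA_eq]
  rw [← List.foldl_map (f := fun p : String × Int => p.2) (g := fun d x => pvG group d x 1),
    ← List.foldl_map (f := fun p : String × Int => p.2)
      (g := fun (c : PySem.Dict Int Int) x => c.insert x (c.getD x 0 + 1)),
    PySem.Dict.foldl_insert_getD_add_one_eq_counter]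
  cases dict_of_number with
  | none =>
      exact congrArg pvFromOuter (dicts_eq group _ PySem.Dict.empty PySem.Dict.nodup_keys_empty)
  | some l =>
      exact congrArg pvFromOuter (dicts_eq group _ (pvToOuter l) (PySem.Dict.nodup_keys_ofList _))
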